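-- pv_equiv track=rewrite | github.com/zehberk/visor_vin_scraper | analysis/reporting.py | build_level2_bins
-- ===== SOURCE A (Python) =====
-- def build_level2_bins(ratings: list) -> tuple[list, list, list, int, int, int]:
--     great_bin = []
--     good_bin = []
--     fair_bin = []
--     poor_count = 0
--     bad_count = 0
--     suspicious_count = 0
--
--     # 0 - listing, 1 - deal, 2 - risk, 3 - narrative
--     for rating in ratings:
--         if rating[1] == "Great":
--             great_bin.append(rating)
--         elif rating[1] == "Good":
--             good_bin.append(rating)
--         elif rating[1] == "Fair":
--             fair_bin.append(rating)
--         elif rating[1] == "Poor":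
--             poor_count += 1
--         elif rating[1] == "Bad":
--             bad_count += 1
--         else:
--             suspicious_count += 1
--
--     # Re-order bins by risk score
--     great_bin = sorted(great_bin, key=lambda r: (r[2], r[0].get("price")))
--     good_bin = sorted(good_bin, key=lambda r: (r[2], r[0].get("price")))
--     fair_bin = sorted(fair_bin, key=lambda r: (r[2], r[0].get("price")))
--
--     return great_bin, good_bin, fair_bin, poor_count, bad_count, suspicious_count
-- ===== SOURCE B (Python) =====
-- def build_level2_bins(ratings: list) -> tuple[list, list, list, int, int, int]:
--     # Staged passes instead of one accumulator loop: each bin/count is an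
--     # independent filtered pass over the input, sorted where needed.
--     key = lambda r: (r[2], r[0].get("price"))
--     great_bin = sorted([r for r in ratings if r[1] == "Great"], key=key)
--     good_bin = sorted([r for r in ratings if r[1] == "Good"], key=key)
--     fair_bin = sorted([r for r in ratings if r[1] == "Fair"], key=key)
--     poor_count = sum(1 for r in ratings if r[1] == "Poor")
--     bad_count = sum(1 for r in ratings if r[1] == "Bad")
--     suspicious_count = sum(
--         1 for r in ratings
--         if r[1] not in ("Great", "Good", "Fair", "Poor", "Bad"))
--     return great_bin, good_bin, fair_bin, poor_count, bad_count, suspicious_count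
-- ===== Notes on version B (the rewrite author's own statement) =====
-- stated objective: simpler
-- what changed: Replaces the single stateful accumulator loop with its five-way if/elif chain by six independent declarative passes: each bin is a filtered comprehension (sorted where needed) and each count a sum over a filter, with no mutable state at all.
import Mathlib
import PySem

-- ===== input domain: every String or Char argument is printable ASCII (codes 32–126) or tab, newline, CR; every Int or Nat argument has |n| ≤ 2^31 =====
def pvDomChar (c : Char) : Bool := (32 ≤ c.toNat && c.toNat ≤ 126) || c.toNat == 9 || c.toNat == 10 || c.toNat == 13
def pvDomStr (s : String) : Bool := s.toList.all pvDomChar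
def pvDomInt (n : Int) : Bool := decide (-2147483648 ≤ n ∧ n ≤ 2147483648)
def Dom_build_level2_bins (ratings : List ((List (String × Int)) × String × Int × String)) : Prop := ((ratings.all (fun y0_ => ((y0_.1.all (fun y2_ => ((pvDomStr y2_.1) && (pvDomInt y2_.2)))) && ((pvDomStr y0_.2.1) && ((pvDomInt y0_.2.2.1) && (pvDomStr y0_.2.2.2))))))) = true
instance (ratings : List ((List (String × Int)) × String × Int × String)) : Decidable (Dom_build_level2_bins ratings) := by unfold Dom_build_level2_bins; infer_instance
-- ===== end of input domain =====

-- B replaces A's single stateful accumulator loop (six accumulators, five-way if/elif) by six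
-- independent declarative passes: filtered comprehensions for the bins, sums over filters for
-- the counts (objective: simpler).

-- ===== PORT A =====
-- sort key of `sorted(bin, key=lambda r: (r[2], r[0].get("price")))`, shared by both ports
-- (both Pythons use the same key lambda). A missing "price" is Python's None; it is encoded as 0
-- here, which is EXACT on Pre_: there a None-price and an int-price never meet at equal risk
-- inside one sorted bin, so the encoded component is only ever compared between two missing
-- prices (tie either way) or two real prices.
def pvKey1 (r : (List (String × Int)) × String × Int × String) : Int := r.2.2.1
def pvKey2 (r : (List (String × Int)) × String × Int × String) : Int := (List.lookup "price" r.1).getD 0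

-- the body of A's for-loop (the five-way if/elif chain over the six accumulators)
def pvStep (st : (List ((List (String × Int)) × String × Int × String)) × (List ((List (String × Int)) × String × Int × String)) × (List ((List (String × Int)) × String × Int × String)) × Int × Int × Int)
    (r : (List (String × Int)) × String × Int × String) :
    (List ((List (String × Int)) × String × Int × String)) × (List ((List (String × Int)) × String × Int × String)) × (List ((List (String × Int)) × String × Int × String)) × Int × Int × Int :=
  let (g, go, f, p, b, su) := st
  if r.2.1 == "Great" then (g ++ [r], go, f, p, b, su)
  else if r.2.1 == "Good" then (g, go ++ [r], f, p, b, su)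
  else if r.2.1 == "Fair" then (g, go, f ++ [r], p, b, su)
  else if r.2.1 == "Poor" then (g, go, f, p + 1, b, su)
  else if r.2.1 == "Bad" then (g, go, f, p, b + 1, su)
  else (g, go, f, p, b, su + 1)

def build_level2_bins (ratings : List ((List (String × Int)) × String × Int × String)) : (List ((List (String × Int)) × String × Int × String)) × (List ((List (String × Int)) × String × Int × String)) × (List ((List (String × Int)) × String × Int × String)) × Int × Int × Int :=
  let st := ratings.foldl pvStep ([], [], [], 0, 0, 0)
  (PySem.List.sorted2 st.1 pvKey1 pvKey2,
   PySem.List.sorted2 st.2.1 pvKey1 pvKey2,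
   PySem.List.sorted2 st.2.2.1 pvKey1 pvKey2,
   st.2.2.2.1, st.2.2.2.2.1, st.2.2.2.2.2)

-- ===== PORT B =====
-- six independent passes: filter + sort for the bins, countP (`sum(1 for … if …)`) for the counts
def build_level2_bins_alt (ratings : List ((List (String × Int)) × String × Int × String)) : (List ((List (String × Int)) × String × Int × String)) × (List ((List (String × Int)) × String × Int × String)) × (List ((List (String × Int)) × String × Int × String)) × Int × Int × Int :=
  let great_bin := PySem.List.sorted2 (ratings.filter (fun r => r.2.1 == "Great")) pvKey1 pvKey2
  let good_bin := PySem.List.sorted2 (ratings.filter (fun r => r.2.1 == "Good")) pvKey1 pvKey2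
  let fair_bin := PySem.List.sorted2 (ratings.filter (fun r => r.2.1 == "Fair")) pvKey1 pvKey2
  let poor_count : Int := ratings.countP (fun r => r.2.1 == "Poor")
  let bad_count : Int := ratings.countP (fun r => r.2.1 == "Bad")
  let suspicious_count : Int := ratings.countP (fun r =>
    !(r.2.1 == "Great" || r.2.1 == "Good" || r.2.1 == "Fair" || r.2.1 == "Poor" || r.2.1 == "Bad"))
  (great_bin, good_bin, fair_bin, poor_count, bad_count, suspicious_count)

-- ===== PRECONDITION & SPEC =====
-- Pre_ excludes exactly the inputs on which the Python sort raises TypeError: two ratings of the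
-- same sorted category ("Great"/"Good"/"Fair") with equal risk score where one listing has a
-- "price" key and the other does not (None is not comparable with int in Python 3).
def Pre_build_level2_bins (ratings : List ((List (String × Int)) × String × Int × String)) : Prop :=
  ∀ a ∈ ratings, ∀ b ∈ ratings,
    a.2.1 = b.2.1 → (a.2.1 = "Great" ∨ a.2.1 = "Good" ∨ a.2.1 = "Fair") → a.2.2.1 = b.2.2.1 →
    (List.lookup "price" a.1).isSome = (List.lookup "price" b.1).isSome
instance (ratings : List ((List (String × Int)) × String × Int × String)) : Decidable (Pre_build_level2_bins ratings) := by unfold Pre_build_level2_bins; infer_instance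

def pvWitness_build_level2_bins : (List ((List (String × Int)) × String × Int × String)) :=
  [([("price", 1)], "Great", 0, "ok"), ([], "Poor", 1, "x"), ([], "odd", 2, "y")]

def Spec_build_level2_bins (ratings : List ((List (String × Int)) × String × Int × String)) (out : (List ((List (String × Int)) × String × Int × String)) × (List ((List (String × Int)) × String × Int × String)) × (List ((List (String × Int)) × String × Int × String)) × Int × Int × Int) : Prop := out = build_level2_bins_alt ratings
instance (ratings : List ((List (String × Int)) × String × Int × String)) (out : (List ((List (String × Int)) × String × Int × String)) × (List ((List (String × Int)) × String × Int × String)) × (List ((List (String × Int)) × String × Int × String)) × Int × Int × Int) : Decidable (Spec_build_level2_bins ratings out) := by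
  unfold Spec_build_level2_bins
  have h1 : DecidableEq (List ((List (String × Int)) × String × Int × String)) := inferInstance
  have h2 : DecidableEq (Int × Int × Int) := inferInstance
  exact @instDecidableEqProd _ _ h1 (@instDecidableEqProd _ _ h1 (@instDecidableEqProd _ _ h1 h2)) out (build_level2_bins_alt ratings)

-- ===== CLAIM (what is proved, stated in full; the proofs are below) =====
def Claim_equal_build_level2_bins : Prop := ∀ (ratings : List ((List (String × Int)) × String × Int × String)), Dom_build_level2_bins ratings → Pre_build_level2_bins ratings → Spec_build_level2_bins ratings (build_level2_bins ratings)

-- ===== LEMMAS AND PROOFS =====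

-- A's loop, from arbitrary accumulators: bins are filters in input order, counts are countP.
theorem pv_loopA (rs : List ((List (String × Int)) × String × Int × String))
    (g go f : List ((List (String × Int)) × String × Int × String)) (p b su : Int) :
    rs.foldl pvStep (g, go, f, p, b, su) =
      (g ++ rs.filter (fun r => r.2.1 == "Great"),
       go ++ rs.filter (fun r => r.2.1 == "Good"),
       f ++ rs.filter (fun r => r.2.1 == "Fair"),
       p + (rs.countP (fun r => r.2.1 == "Poor") : Int),
       b + (rs.countP (fun r => r.2.1 == "Bad") : Int),
       su + (rs.countP (fun r =>
         (!(r.2.1 == "Great") && !(r.2.1 == "Good") && !(r.2.1 == "Fair") && !(r.2.1 == "Poor") && !(r.2.1 == "Bad"))) : Int)) := by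
  induction rs generalizing g go f p b su with
  | nil => simp
  | cons x t ih =>
    by_cases h1 : x.2.1 = "Great"
    · simp [pvStep, h1, List.filter_cons, List.countP_cons, ih, List.append_assoc]
    · by_cases h2 : x.2.1 = "Good"
      · simp [pvStep, h1, h2, List.filter_cons, List.countP_cons, ih, List.append_assoc]
      · by_cases h3 : x.2.1 = "Fair"
        · simp [pvStep, h1, h2, h3, List.filter_cons, List.countP_cons, ih, List.append_assoc]
        · by_cases h4 : x.2.1 = "Poor"
          · simp [pvStep, h1, h2, h3, h4, List.filter_cons, List.countP_cons, ih, add_assoc,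
              add_comm (1 : Int)]
          · by_cases h5 : x.2.1 = "Bad"
            · simp [pvStep, h1, h2, h3, h4, h5, List.filter_cons, List.countP_cons, ih, add_assoc,
                add_comm (1 : Int)]
            · simp [pvStep, h1, h2, h3, h4, h5, List.filter_cons, List.countP_cons, ih, add_assoc,
                add_comm (1 : Int)]

-- A's residual predicate (conjunction of negations) is B's negated disjunction.
theorem pv_susp_pred (rs : List ((List (String × Int)) × String × Int × String)) :
    rs.countP (fun r =>
        (!(r.2.1 == "Great") && !(r.2.1 == "Good") && !(r.2.1 == "Fair") && !(r.2.1 == "Poor") && !(r.2.1 == "Bad")))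
      = rs.countP (fun r =>
        !(r.2.1 == "Great" || r.2.1 == "Good" || r.2.1 == "Fair" || r.2.1 == "Poor" || r.2.1 == "Bad")) := by
  apply List.countP_congr
  intro r _
  simp [Bool.and_assoc]

-- ===== VERDICT (by name: the statement is the Claim_ definition above) =====
theorem build_level2_bins_spec : Claim_equal_build_level2_bins := by
  intro ratings _hdom _hpre
  simp only [Spec_build_level2_bins, build_level2_bins, build_level2_bins_alt,
    pv_loopA, pv_susp_pred, List.nil_append, zero_add]
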